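-- pv_equiv track=rewrite | github.com/inhahe/DirtyFork | menu.py | _compute_min_prefixes
-- ===== SOURCE A (Python) =====
-- def _compute_min_prefixes(names):
--   """Compute the minimum unique prefix length for each name in the list.
--   Returns a dict of {name: min_prefix_length}.
--   The prefix is the shortest start of the name that uniquely identifies it
--   among all names (case-insensitive)."""
--   result = {}
--   lower_names = [n.lower() for n in names]
--   for i, name in enumerate(names):
--     ln = lower_names[i]
--     min_len = 1
--     while min_len <= len(ln):
--       prefix = ln[:min_len]
--       # Count how many other names share this prefix
--       conflicts = sum(1 for j, other in enumerate(lower_names) if j != i and other.startswith(prefix))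
--       if conflicts == 0:
--         break
--       min_len += 1
--     result[name] = min(min_len, len(name))
--   return result
-- ===== SOURCE B (Python) =====
-- def _lcp(a, b):
--   """Length of the longest common prefix of two strings."""
--   m = min(len(a), len(b))
--   l = 0
--   while l < m and a[l] == b[l]:
--     l += 1
--   return l
--
--
-- def _compute_min_prefixes(names):
--   """Compute the minimum unique prefix length for each name in the list.
--   Returns a dict of {name: min_prefix_length}.
--   The prefix is the shortest start of the name that uniquely identifies it
--   among all names (case-insensitive)."""
--   lowers = [n.lower() for n in names]
--   order = sorted(range(len(names)), key=lambda i: lowers[i])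
--   best = [0] * len(names)
--   for k, i in enumerate(order):
--     b = 0
--     if k > 0:
--       b = _lcp(lowers[i], lowers[order[k - 1]])
--     if k + 1 < len(order):
--       b = max(b, _lcp(lowers[i], lowers[order[k + 1]]))
--     best[i] = b
--   return {name: min(best[i] + 1, len(name)) for i, name in enumerate(names)}
-- ===== Notes on version B (the rewrite author's own statement) =====
-- stated objective: faster
-- what changed: Instead of growing each prefix one character at a time and re-scanning all names with startswith at every length (quadratic also in string length), B sorts the indices by lowercased name once and reads each name's maximal common-prefix length off its two sorted neighbours (max LCP with any other name equals max LCP with a sorted neighbour), then min_prefix = that LCP + 1 capped by the name's length.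
import Mathlib
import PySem

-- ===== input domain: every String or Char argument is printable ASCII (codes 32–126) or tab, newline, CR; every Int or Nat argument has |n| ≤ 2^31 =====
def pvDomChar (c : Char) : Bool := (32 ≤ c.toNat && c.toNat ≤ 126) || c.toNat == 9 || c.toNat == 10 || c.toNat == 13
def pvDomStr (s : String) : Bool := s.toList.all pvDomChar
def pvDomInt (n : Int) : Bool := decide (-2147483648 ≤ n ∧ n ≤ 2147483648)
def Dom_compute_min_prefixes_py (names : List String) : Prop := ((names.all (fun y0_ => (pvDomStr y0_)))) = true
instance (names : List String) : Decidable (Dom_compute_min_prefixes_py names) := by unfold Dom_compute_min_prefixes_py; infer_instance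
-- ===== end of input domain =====

-- B replaces A's per-name grow-the-prefix-and-rescan-all-names search by one sort of the
-- indices by lowercased name: each name's maximal common-prefix length with any other name
-- is read off its two sorted neighbours, and min_prefix = that length + 1, capped by len(name).

-- ===== PORT A =====

-- A's inner `while min_len <= len(ln)` loop: grow min_len until no OTHER lowered name
-- starts with ln[:min_len].  (`minLen ≤ ln.toList.length` is exactly `min_len <= len(ln)`,
-- both sides the same natural number.)
def pvAWhile (lower_names : List String) (i : Int) (ln : String) (minLen : Nat) : Nat :=
  if h : minLen ≤ ln.toList.length then
    let pre := PySem.List.slice ln.toList none (some (minLen : Int))   -- ln[:min_len]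
    let conflicts : Int := ((PySem.List.enumerate lower_names 0).map
      (fun p => if p.1 ≠ i ∧ PySem.Chars.startswith p.2.toList pre = true then (1 : Int) else 0)).sum
    if conflicts = 0 then minLen
    else pvAWhile lower_names i ln (minLen + 1)
  else minLen
termination_by ln.toList.length + 1 - minLen
decreasing_by omega

def compute_min_prefixes_py (names : List String) : List (String × Int) :=
  let lower_names := names.map PySem.Str.lower
  ((PySem.List.enumerate names 0).foldl
    (fun (result : PySem.Dict String Int) p =>
      -- ln = lower_names[i]; i comes from enumerate, always in range, so pyGetD is exact
      let ln := PySem.List.pyGetD lower_names p.1 ""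
      let min_len := pvAWhile lower_names p.1 ln 1
      result.insert p.2 (min (min_len : Int) (PySem.Str.len p.2)))
    PySem.Dict.empty).items

-- ===== PORT B =====

-- _lcp's `while l < m and a[l] == b[l]` loop; l < m ≤ both lengths keeps a[l], b[l] in
-- range, so pyGetD with a dummy default is exact.
def pvLcpGo (a b : List Char) (m l : Nat) : Nat :=
  if h : l < m then
    if PySem.List.pyGetD a (l : Int) ' ' = PySem.List.pyGetD b (l : Int) ' ' then
      pvLcpGo a b m (l + 1)
    else l
  else l
termination_by m - l
decreasing_by omega

-- port of helper _lcp
def pvLcp (a b : String) : Nat :=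
  pvLcpGo a.toList b.toList (min a.toList.length b.toList.length) 0

-- the value B's loop body computes for one (k, i) of enumerate(order) …
def pvBVal (lowers : List String) (order : List Int) (p : Int × Int) : Int :=
  let k := p.1
  let i := p.2
  let b0 : Int := if 0 < k then
      (pvLcp (PySem.List.pyGetD lowers i "")
             (PySem.List.pyGetD lowers (PySem.List.pyGetD order (k - 1) 0) "") : Int)
    else 0
  let b1 : Int := if k + 1 < (order.length : Int) then
      max b0 (pvLcp (PySem.List.pyGetD lowers i "")
                    (PySem.List.pyGetD lowers (PySem.List.pyGetD order (k + 1) 0) "") : Int)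
    else b0
  b1

-- … and the write `best[i] = b` of that value
def pvBStep (lowers : List String) (order : List Int) (best : List Int) (p : Int × Int) : List Int :=
  PySem.List.pySetD best p.2 (pvBVal lowers order p)

def compute_min_prefixes_py_alt (names : List String) : List (String × Int) :=
  let lowers := names.map PySem.Str.lower
  let order := PySem.List.sorted (PySem.List.pyRange 0 (names.length : Int) 1)
                 (fun i => PySem.List.pyGetD lowers i "") false
  let best := (PySem.List.enumerate order 0).foldl (pvBStep lowers order)
                 (List.replicate names.length (0 : Int))
  ((PySem.List.enumerate names 0).foldl
    (fun (d : PySem.Dict String Int) p =>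
      d.insert p.2 (min (PySem.List.pyGetD best p.1 0 + 1) (PySem.Str.len p.2)))
    PySem.Dict.empty).items

-- ===== PRECONDITION & SPEC =====
def Spec_compute_min_prefixes_py (names : List String) (out : List (String × Int)) : Prop := out = compute_min_prefixes_py_alt names
instance (names : List String) (out : List (String × Int)) : Decidable (Spec_compute_min_prefixes_py names out) := by unfold Spec_compute_min_prefixes_py; infer_instance

-- ===== CLAIM (what is proved, stated in full; the proofs are below) =====
def Claim_equal_compute_min_prefixes_py : Prop := ∀ (names : List String), Dom_compute_min_prefixes_py names → Spec_compute_min_prefixes_py names (compute_min_prefixes_py names)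

-- ===== LEMMAS AND PROOFS =====

-- longest common prefix, structurally: the notion both ports are reduced to
def clcp : List Char → List Char → Nat
  | a :: as, b :: bs => if a = b then clcp as bs + 1 else 0
  | _, _ => 0

theorem clcp_comm (a b : List Char) : clcp a b = clcp b a := by
  induction a generalizing b with
  | nil => cases b <;> rfl
  | cons x xs ih =>
    cases b with
    | nil => rfl
    | cons y ys =>
      by_cases h : x = y
      · subst h; simp [clcp, ih]
      · simp [clcp, h, Ne.symm h]

theorem clcp_le_left (a b : List Char) : clcp a b ≤ a.length := by
  induction a generalizing b with
  | nil => cases b <;> simp [clcp]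
  | cons x xs ih =>
    cases b with
    | nil => simp [clcp]
    | cons y ys =>
      by_cases h : x = y
      · subst h; simpa [clcp] using ih ys
      · simp [clcp, h]

theorem le_clcp_iff (a b : List Char) (k : Nat) :
    k ≤ clcp a b ↔ k ≤ a.length ∧ k ≤ b.length ∧ a.take k = b.take k := by
  induction a generalizing b k with
  | nil =>
    cases b <;> cases k <;> simp [clcp]
  | cons x xs ih =>
    cases b with
    | nil => cases k <;> simp [clcp]
    | cons y ys =>
      cases k with
      | zero => simp
      | succ k' =>
        by_cases h : x = y
        · subst h
          have e : clcp (x::xs) (x::ys) = clcp xs ys + 1 := by simp [clcp]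
          rw [e]
          simp only [List.take_succ_cons, List.length_cons]
          constructor
          · intro hk
            have := (ih ys k').mp (by omega)
            exact ⟨by omega, by omega, by simp [this.2.2]⟩
          · rintro ⟨h1, h2, h3⟩
            have h4 : xs.take k' = ys.take k' := by simpa using h3
            have := (ih ys k').mpr ⟨by omega, by omega, h4⟩
            omega
        · simp [clcp, h, List.take_succ_cons]

theorem startswith_slice_iff (a b : List Char) (k : Nat) (hk : k ≤ a.length) :
    PySem.Chars.startswith b (PySem.List.slice a none (some (k : Int))) = true ↔ k ≤ clcp a b := by
  rw [PySem.List.slice_to_natCast, PySem.Chars.startswith_iff, List.prefix_iff_eq_take]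
  have hlen : (a.take k).length = k := by simp [Nat.min_eq_left hk]
  rw [hlen]
  constructor
  · intro h
    have hkb : k ≤ b.length := by
      have := congrArg List.length h
      simp at this
      omega
    exact (le_clcp_iff a b k).mpr ⟨hk, hkb, h⟩
  · intro h
    exact ((le_clcp_iff a b k).mp h).2.2

theorem clcp_lex (x y z : List Char) (hxy : x ≤ y) (hyz : y ≤ z) :
    clcp x z ≤ clcp y z ∧ clcp x z ≤ clcp x y := by
  induction x generalizing y z with
  | nil => cases z <;> simp [clcp]
  | cons a x' ih =>
    cases z with
    | nil => simp [clcp]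
    | cons c z' =>
      cases y with
      | nil => exact absurd (List.nil_lt_cons a x') (not_lt.mpr hxy)
      | cons b y' =>
        have hxy' := not_lt.mpr hxy
        have hyz' := not_lt.mpr hyz
        rw [List.cons_lt_cons_iff] at hxy' hyz'
        push Not at hxy' hyz'
        by_cases hac : a = c
        · subst hac
          have hba : b = a := le_antisymm hyz'.1 hxy'.1
          subst hba
          have := ih y' z' (hxy'.2 rfl) (hyz'.2 rfl)
          simp [clcp]
          omega
        · simp [clcp, hac]

theorem clcp_str_lex (x y z : String) (hxy : x ≤ y) (hyz : y ≤ z) :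
    clcp x.toList z.toList ≤ clcp y.toList z.toList ∧
    clcp x.toList z.toList ≤ clcp x.toList y.toList := by
  apply clcp_lex
  · rw [← not_lt, ← String.lt_iff_toList_lt]; exact not_lt.mpr hxy
  · rw [← not_lt, ← String.lt_iff_toList_lt]; exact not_lt.mpr hyz

theorem pvLcpGo_eq (a b : List Char) (l : Nat) (hl : l ≤ min a.length b.length) :
    pvLcpGo a b (min a.length b.length) l = l + clcp (a.drop l) (b.drop l) := by
  generalize hf : min a.length b.length - l = f
  induction f generalizing l with
  | zero =>
    have hlm : ¬ l < min a.length b.length := by omega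
    rw [pvLcpGo, dif_neg hlm]
    -- l = min of the lengths: one of the drops is empty
    have : a.drop l = [] ∨ b.drop l = [] := by
      by_cases hab : a.length ≤ b.length
      · left; apply List.drop_eq_nil_of_le; omega
      · right; apply List.drop_eq_nil_of_le; omega
    rcases this with h | h <;> rw [h]
    · cases b.drop l <;> simp [clcp]
    · cases a.drop l <;> simp [clcp]
  | succ f ih =>
    have hlm : l < min a.length b.length := by omega
    have ha : l < a.length := by omega
    have hb : l < b.length := by omega
    rw [pvLcpGo, dif_pos hlm]
    rw [PySem.List.pyGetD_eq_getElem a ' ' (by omega) (by exact_mod_cast ha),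
        PySem.List.pyGetD_eq_getElem b ' ' (by omega) (by exact_mod_cast hb)]
    simp only [Int.toNat_natCast]
    rw [List.drop_eq_getElem_cons ha, List.drop_eq_getElem_cons hb]
    by_cases hc : a[l] = b[l]
    · rw [if_pos hc]
      rw [ih (l+1) (by omega) (by omega)]
      rw [← List.drop_eq_getElem_cons ha, ← List.drop_eq_getElem_cons hb]
      rw [List.drop_eq_getElem_cons ha, List.drop_eq_getElem_cons hb]
      simp [clcp, hc]
      omega
    · rw [if_neg hc]
      simp [clcp, hc]

theorem pvLcp_eq (a b : String) : pvLcp a b = clcp a.toList b.toList := by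
  have := pvLcpGo_eq a.toList b.toList 0 (by omega)
  simpa [pvLcp] using this

def oLcp (lowers : List String) (k : Nat) : List Nat :=
  ((List.range lowers.length).filter (fun j => j ≠ k)).map
    (fun j => clcp (lowers.getD k "").toList (lowers.getD j "").toList)

def bigM (lowers : List String) (k : Nat) : Nat := (oLcp lowers k).foldl max 0

theorem bigM_le_len (lowers : List String) (k : Nat) :
    bigM lowers k ≤ (lowers.getD k "").toList.length := by
  unfold bigM oLcp
  rcases PySem.List.foldl_max_mem (((List.range lowers.length).filter (fun j => j ≠ k)).map
    (fun j => clcp (lowers.getD k "").toList (lowers.getD j "").toList)) 0 with h | h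
  · omega
  · simp only [List.mem_map] at h
    obtain ⟨j, _, hj⟩ := h
    rw [← hj]
    exact clcp_le_left _ _

theorem conflict_iff (lowers : List String) (k m : Nat) (hm : 1 ≤ m) :
    (∃ j, j < lowers.length ∧ j ≠ k ∧
        m ≤ clcp (lowers.getD k "").toList (lowers.getD j "").toList)
      ↔ m ≤ bigM lowers k := by
  constructor
  · rintro ⟨j, hj, hjk, hle⟩
    have hmem : clcp (lowers.getD k "").toList (lowers.getD j "").toList ∈ oLcp lowers k := by
      unfold oLcp
      apply List.mem_map_of_mem
      simp [List.mem_filter, hjk, hj]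
    have := (PySem.List.le_foldl_max (oLcp lowers k) 0).2 _ hmem
    unfold bigM
    omega
  · intro h
    unfold bigM oLcp at h
    rcases PySem.List.foldl_max_mem (((List.range lowers.length).filter (fun j => j ≠ k)).map
      (fun j => clcp (lowers.getD k "").toList (lowers.getD j "").toList)) 0 with h0 | h0
    · omega
    · simp only [List.mem_map, List.mem_filter, List.mem_range] at h0
      obtain ⟨j, ⟨hj, hjk⟩, hv⟩ := h0
      refine ⟨j, hj, by simpa using hjk, ?_⟩
      rw [hv]
      exact h

theorem sum_ite_eq_zero_iff {α : Type} (l : List α) (P : α → Prop) [DecidablePred P] :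
    ((l.map (fun x => if P x then (1 : Int) else 0)).sum = 0) ↔ ∀ x ∈ l, ¬ P x := by
  induction l with
  | nil => simp
  | cons a t ih =>
    have hnn : (0 : Int) ≤ (t.map (fun x => if P x then (1 : Int) else 0)).sum := by
      apply List.sum_nonneg
      intro x hx
      simp only [List.mem_map] at hx
      obtain ⟨y, _, hy⟩ := hx
      rw [← hy]
      split <;> omega
    by_cases h : P a
    · simp only [List.map_cons, List.sum_cons, if_pos h]
      constructor
      · intro he; omega
      · intro hall; exact absurd h (hall a (by simp))
    · simp only [List.map_cons, List.sum_cons, if_neg h, zero_add]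
      rw [ih]
      constructor
      · intro hall x hx
        rcases List.mem_cons.mp hx with rfl | hx'
        · exact h
        · exact hall x hx'
      · intro hall x hx; exact hall x (List.mem_cons_of_mem _ hx)

theorem conflicts_eq_zero_iff (lowers : List String) (k m : Nat)
    (hm : 1 ≤ m) (hml : m ≤ (lowers.getD k "").toList.length) :
    (((PySem.List.enumerate lowers 0).map
      (fun p => if p.1 ≠ (k : Int) ∧ PySem.Chars.startswith p.2.toList
          (PySem.List.slice (lowers.getD k "").toList none (some (m : Int))) = true
        then (1 : Int) else 0)).sum = 0) ↔ bigM lowers k < m := by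
  rw [sum_ite_eq_zero_iff]
  constructor
  · intro hall
    by_contra hlt
    have hle : m ≤ bigM lowers k := by omega
    obtain ⟨j, hj, hjk, hcl⟩ := (conflict_iff lowers k m hm).mpr hle
    have hmem : ((j : Int), lowers.getD j "") ∈ PySem.List.enumerate lowers 0 := by
      rw [PySem.List.mem_enumerate_iff]
      exact ⟨j, hj, by simp [List.getElem?_eq_getElem hj]⟩
    have := hall _ hmem
    apply this
    constructor
    · show (j : Int) ≠ (k : Int)
      exact_mod_cast hjk
    · exact (startswith_slice_iff _ _ m hml).mpr hcl
  · intro hlt p hp ⟨hne, hsw⟩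
    rw [PySem.List.mem_enumerate_iff] at hp
    obtain ⟨j, hj, rfl⟩ := hp
    simp only [zero_add] at hne hsw
    have hjk : j ≠ k := by intro h; exact hne (by simp [h])
    have hcl : m ≤ clcp (lowers.getD k "").toList lowers[j].toList :=
      (startswith_slice_iff _ _ m hml).mp hsw
    have : m ≤ bigM lowers k := (conflict_iff lowers k m hm).mp
      ⟨j, hj, hjk, by rwa [List.getD_eq_getElem _ _ hj]⟩
    omega

theorem pvAWhile_eq (lowers : List String) (k : Nat) (m : Nat) (hm : 1 ≤ m)
    (hle : m ≤ bigM lowers k + 1) :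
    pvAWhile lowers (k : Int) (lowers.getD k "") m = bigM lowers k + 1 := by
  generalize hf : bigM lowers k + 1 - m = f
  induction f generalizing m with
  | zero =>
    have hmeq : m = bigM lowers k + 1 := by omega
    subst hmeq
    rw [pvAWhile]
    by_cases hl : bigM lowers k + 1 ≤ (lowers.getD k "").toList.length
    · rw [dif_pos hl]
      have hz := (conflicts_eq_zero_iff lowers k (bigM lowers k + 1) (by omega) hl).mpr (by omega)
      simp only [hz, if_pos trivial]
    · rw [dif_neg hl]
  | succ f ih =>
    have hlt : m ≤ bigM lowers k := by omega
    have hl : m ≤ (lowers.getD k "").toList.length := le_trans hlt (bigM_le_len lowers k)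
    rw [pvAWhile, dif_pos hl]
    have hnz : ¬ (((PySem.List.enumerate lowers 0).map
      (fun p => if p.1 ≠ (k : Int) ∧ PySem.Chars.startswith p.2.toList
          (PySem.List.slice (lowers.getD k "").toList none (some (m : Int))) = true
        then (1 : Int) else 0)).sum = 0) := by
      rw [conflicts_eq_zero_iff lowers k m hm hl]
      omega
    simp only [if_neg hnz]
    exact ih (m + 1) (by omega) (by omega) (by omega)

theorem pyGetD_pySetD_of_ne (xs : List Int) (i j : Int) (v : Int)
    (hi : 0 ≤ i) (hlt : i < (xs.length : Int)) (hj : 0 ≤ j) (hne : i ≠ j) :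
    PySem.List.pyGetD (PySem.List.pySetD xs i v) j 0 = PySem.List.pyGetD xs j 0 := by
  have e1 : i = ((i.toNat : Nat) : Int) := by omega
  have e2 : j = ((j.toNat : Nat) : Int) := by omega
  rw [e1, e2, PySem.List.pyGetD_pySetD_natCast _ _ _ _ _ (by omega), if_neg (by omega)]

theorem foldl_pvBStep_untouched (lowers : List String) (order : List Int)
    (l : List (Int × Int)) (init : List Int) (j : Int) (hj : 0 ≤ j)
    (h : ∀ p ∈ l, p.2 ≠ j)
    (hrange : ∀ p ∈ l, 0 ≤ p.2 ∧ p.2 < (init.length : Int)) :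
    PySem.List.pyGetD (l.foldl (pvBStep lowers order) init) j 0
      = PySem.List.pyGetD init j 0 := by
  induction l generalizing init with
  | nil => rfl
  | cons p rest ih =>
    simp only [List.foldl_cons]
    have hr := hrange p (by simp)
    rw [ih _ (fun q hq => h q (List.mem_cons_of_mem _ hq))
        (fun q hq => by simpa [pvBStep, PySem.List.length_pySetD] using hrange q (List.mem_cons_of_mem _ hq))]
    exact pyGetD_pySetD_of_ne init p.2 j _ hr.1 hr.2 hj (h p (by simp))

theorem foldl_pvBStep_getD (lowers : List String) (order : List Int)
    (l : List (Int × Int)) (init : List Int)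
    (hnd : (l.map (·.2)).Nodup)
    (hrange : ∀ p ∈ l, 0 ≤ p.2 ∧ p.2 < (init.length : Int)) :
    ∀ p ∈ l, PySem.List.pyGetD (l.foldl (pvBStep lowers order) init) p.2 0
      = pvBVal lowers order p := by
  induction l generalizing init with
  | nil => intro p hp; cases hp
  | cons p0 rest ih =>
    intro p hp
    simp only [List.map_cons, List.nodup_cons] at hnd
    have hlen : (pvBStep lowers order init p0).length = init.length := by
      simp [pvBStep, PySem.List.length_pySetD]
    rcases List.mem_cons.mp hp with rfl | hp'
    · simp only [List.foldl_cons]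
      have hr := hrange p (by simp)
      rw [foldl_pvBStep_untouched lowers order rest _ p.2 hr.1
          (fun q hq => by
            intro he
            exact hnd.1 (by rw [← he]; exact List.mem_map_of_mem hq))
          (fun q hq => by rw [hlen] at *; exact hrange q (List.mem_cons_of_mem _ hq))]
      -- read back the just-written cell
      simp only [pvBStep]
      have : p.2 = ((p.2.toNat : Nat) : Int) := by omega
      rw [this, PySem.List.pyGetD_pySetD_natCast _ _ _ _ _ (by omega)]
      simp
    · simp only [List.foldl_cons]
      exact ih _ hnd.2 (fun q hq => by rw [hlen]; exact hrange q (List.mem_cons_of_mem _ hq)) p hp'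

theorem mem_oLcp_le_bigM (lowers : List String) (k j : Nat) (hj : j < lowers.length)
    (hjk : j ≠ k) : clcp (lowers.getD k "").toList (lowers.getD j "").toList ≤ bigM lowers k := by
  apply (PySem.List.le_foldl_max (oLcp lowers k) 0).2
  unfold oLcp
  apply List.mem_map_of_mem
  simp [List.mem_filter, hjk, hj]

theorem pvBVal_eq_bigM_aux (lowers : List String) (order : List Int) (t : Nat)
    (hbound : ∀ p, p < order.length → 0 ≤ order.getD p 0 ∧ order.getD p 0 < (lowers.length : Int))
    (hne : ∀ p q, p < order.length → q < order.length → p ≠ q → order.getD p 0 ≠ order.getD q 0)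
    (hmono : ∀ p q, p ≤ q → q < order.length →
        lowers.getD (order.getD p 0).toNat "" ≤ lowers.getD (order.getD q 0).toNat "")
    (hfind : ∀ j : Nat, j < lowers.length → ∃ t', t' < order.length ∧ order.getD t' 0 = (j : Int))
    (ht : t < order.length) :
    pvBVal lowers order ((t : Int), order.getD t 0)
      = (bigM lowers (order.getD t 0).toNat : Int) := by
  have hti := hbound t ht
  set i := order.getD t 0 with hi
  set j0 := i.toNat with hj0
  have hj0n : j0 < lowers.length := by omega
  have hij0 : i = (j0 : Int) := by omega
  set cs := (lowers.getD j0 "").toList with hcs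
  have hplow : ∀ p, p < order.length →
      PySem.List.pyGetD lowers (order.getD p 0) "" = lowers.getD (order.getD p 0).toNat "" := by
    intro p hp
    obtain ⟨h0, h1⟩ := hbound p hp
    rw [PySem.List.pyGetD_eq_getElem _ _ h0 (by omega)]
    exact (List.getD_eq_getElem _ _ (by omega)).symm
  have hnbr_le : ∀ p, ∀ (hp : p < order.length), p ≠ t →
      clcp cs (lowers.getD (order.getD p 0).toNat "").toList ≤ bigM lowers j0 := by
    intro p hp hpt
    apply mem_oLcp_le_bigM lowers j0 _ (by have := (hbound p hp).2; omega)
    intro he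
    apply hne p t hp ht hpt
    have h0 := (hbound p hp).1
    omega
  have hbig_le : ∀ (N : Nat),
      (0 < t → clcp cs (lowers.getD (order.getD (t-1) 0).toNat "").toList ≤ N) →
      (t + 1 < order.length → clcp cs (lowers.getD (order.getD (t+1) 0).toNat "").toList ≤ N) →
      bigM lowers j0 ≤ N := by
    intro N hprev hnext
    unfold bigM oLcp
    rcases PySem.List.foldl_max_mem (((List.range lowers.length).filter (fun j => j ≠ j0)).map
      (fun j => clcp (lowers.getD j0 "").toList (lowers.getD j "").toList)) 0 with h0 | h0
    · omega
    · simp only [List.mem_map, List.mem_filter, List.mem_range] at h0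
      obtain ⟨j, ⟨hj, hjk⟩, hv⟩ := h0
      rw [← hv]
      have hjk' : j ≠ j0 := by simpa using hjk
      obtain ⟨t', ht', heD⟩ := hfind j hj
      have htt : t' ≠ t := by
        intro hh
        rw [hh, ← hi] at heD
        omega
      rcases Nat.lt_or_ge t' t with hlt | hge
      · have h0t : 0 < t := by omega
        have hx : lowers.getD j "" ≤ lowers.getD (order.getD (t-1) 0).toNat "" := by
          have := hmono t' (t-1) (by omega) (by omega)
          rwa [heD, Int.toNat_natCast] at this
        have hy : lowers.getD (order.getD (t-1) 0).toNat "" ≤ lowers.getD j0 "" := by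
          have := hmono (t-1) t (by omega) ht
          rwa [← hi, hij0, Int.toNat_natCast] at this
        have hs := (clcp_str_lex _ _ _ hx hy).1
        calc clcp (lowers.getD j0 "").toList (lowers.getD j "").toList
            = clcp (lowers.getD j "").toList (lowers.getD j0 "").toList := clcp_comm _ _
          _ ≤ clcp (lowers.getD (order.getD (t-1) 0).toNat "").toList (lowers.getD j0 "").toList := hs
          _ = clcp cs (lowers.getD (order.getD (t-1) 0).toNat "").toList := clcp_comm _ _
          _ ≤ N := hprev h0t
      · have h1t : t + 1 < order.length := by omega
        have hx : lowers.getD j0 "" ≤ lowers.getD (order.getD (t+1) 0).toNat "" := by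
          have := hmono t (t+1) (by omega) h1t
          rwa [← hi, hij0, Int.toNat_natCast] at this
        have hy : lowers.getD (order.getD (t+1) 0).toNat "" ≤ lowers.getD j "" := by
          have := hmono (t+1) t' (by omega) ht'
          rwa [heD, Int.toNat_natCast] at this
        have hs := (clcp_str_lex _ _ _ hx hy).2
        exact le_trans hs (hnext h1t)
  -- now compute pvBVal
  have hilow : PySem.List.pyGetD lowers i "" = lowers.getD j0 "" := by
    have := hplow t ht
    rwa [← hi] at this
  unfold pvBVal
  simp only [hilow]
  by_cases h0 : 0 < t
  · have hc0 : (0 : Int) < (t : Int) := by omega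
    have et1 : (t : Int) - 1 = ((t - 1 : Nat) : Int) := by omega
    rw [if_pos hc0, et1, PySem.List.pyGetD_natCast, hplow (t-1) (by omega), pvLcp_eq]
    by_cases h1 : t + 1 < order.length
    · have hc1 : (t : Int) + 1 < (order.length : Int) := by omega
      have et2 : (t : Int) + 1 = ((t + 1 : Nat) : Int) := by omega
      rw [if_pos hc1, et2, PySem.List.pyGetD_natCast, hplow (t+1) h1, pvLcp_eq]
      rw [← Nat.cast_max]
      congr 1
      apply Nat.le_antisymm
      · apply max_le (hnbr_le (t-1) (by omega) (by omega)) (hnbr_le (t+1) h1 (by omega))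
      · exact hbig_le _ (fun _ => le_max_left _ _) (fun _ => le_max_right _ _)
    · have hc1 : ¬ ((t : Int) + 1 < (order.length : Int)) := by omega
      rw [if_neg hc1]
      congr 1
      apply Nat.le_antisymm
      · exact hnbr_le (t-1) (by omega) (by omega)
      · exact hbig_le _ (fun _ => le_refl _) (fun hh => absurd hh h1)
  · have hc0 : ¬ ((0 : Int) < (t : Int)) := by omega
    rw [if_neg hc0]
    by_cases h1 : t + 1 < order.length
    · have hc1 : (t : Int) + 1 < (order.length : Int) := by omega
      have et2 : (t : Int) + 1 = ((t + 1 : Nat) : Int) := by omega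
      rw [if_pos hc1, et2, PySem.List.pyGetD_natCast, hplow (t+1) h1, pvLcp_eq]
      rw [max_eq_right (by positivity)]
      congr 1
      apply Nat.le_antisymm
      · exact hnbr_le (t+1) h1 (by omega)
      · exact hbig_le _ (fun hh => absurd hh (by omega)) (fun _ => le_refl _)
    · have hc1 : ¬ ((t : Int) + 1 < (order.length : Int)) := by omega
      rw [if_neg hc1]
      symm
      simp only [Nat.cast_eq_zero]
      apply Nat.le_antisymm _ (Nat.zero_le _)
      exact hbig_le 0 (fun hh => absurd hh h0) (fun hh => absurd hh h1)

theorem pvBVal_sorted_eq_bigM (lowers : List String) (t : Nat)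
    (ht : t < (PySem.List.sorted (PySem.List.pyRange 0 (lowers.length : Int) 1)
        (fun i => PySem.List.pyGetD lowers i "") false).length) :
    pvBVal lowers
      (PySem.List.sorted (PySem.List.pyRange 0 (lowers.length : Int) 1)
        (fun i => PySem.List.pyGetD lowers i "") false)
      ((t : Int),
        (PySem.List.sorted (PySem.List.pyRange 0 (lowers.length : Int) 1)
          (fun i => PySem.List.pyGetD lowers i "") false).getD t 0)
      = (bigM lowers
          ((PySem.List.sorted (PySem.List.pyRange 0 (lowers.length : Int) 1)
            (fun i => PySem.List.pyGetD lowers i "") false).getD t 0).toNat : Int) := by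
  apply pvBVal_eq_bigM_aux lowers _ t ?hbound ?hne ?hmono ?hfind ht
  case hbound =>
    intro p hp
    rw [List.getD_eq_getElem _ 0 hp]
    have hmem := List.getElem_mem hp
    rw [PySem.List.mem_sorted] at hmem
    exact PySem.List.mem_pyRange_one.mp hmem
  case hne =>
    intro p q hp hq hpq
    rw [List.getD_eq_getElem _ 0 hp, List.getD_eq_getElem _ 0 hq]
    intro he
    apply hpq
    apply (List.Nodup.getElem_inj_iff ?_).mp he
    exact ((PySem.List.sorted_perm _ _ _).nodup_iff).mpr (PySem.List.nodup_pyRange_one _ _)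
  case hmono =>
    intro p q hpq hq
    have hp := lt_of_le_of_lt hpq hq
    have hm := PySem.List.key_sorted_getElem_mono (PySem.List.pyRange 0 (lowers.length : Int) 1)
      (fun i => PySem.List.pyGetD lowers i "") hpq hq
    have hb : ∀ r (hr : r < (PySem.List.sorted (PySem.List.pyRange 0 (lowers.length : Int) 1)
        (fun i => PySem.List.pyGetD lowers i "") false).length),
        PySem.List.pyGetD lowers
            ((PySem.List.sorted (PySem.List.pyRange 0 (lowers.length : Int) 1)
              (fun i => PySem.List.pyGetD lowers i "") false)[r]) ""
          = lowers.getD ((PySem.List.sorted (PySem.List.pyRange 0 (lowers.length : Int) 1)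
              (fun i => PySem.List.pyGetD lowers i "") false).getD r 0).toNat "" := by
      intro r hr
      have hmem := List.getElem_mem hr
      rw [PySem.List.mem_sorted] at hmem
      obtain ⟨h0, h1⟩ := PySem.List.mem_pyRange_one.mp hmem
      rw [List.getD_eq_getElem _ 0 hr,
        PySem.List.pyGetD_eq_getElem _ _ h0 (by omega)]
      exact (List.getD_eq_getElem _ _ (by omega)).symm
    rw [hb p hp, hb q hq] at hm
    exact hm
  case hfind =>
    intro j hj
    have hmem : (j : Int) ∈ PySem.List.sorted (PySem.List.pyRange 0 (lowers.length : Int) 1)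
        (fun i => PySem.List.pyGetD lowers i "") false := by
      rw [PySem.List.mem_sorted, PySem.List.mem_pyRange_one]
      constructor <;> omega
    obtain ⟨t', ht', he⟩ := List.mem_iff_getElem.mp hmem
    exact ⟨t', ht', by rw [List.getD_eq_getElem _ 0 ht']; exact he⟩

-- ===== VERDICT (by name: the statement is the Claim_ definition above) =====
theorem compute_min_prefixes_py_spec : Claim_equal_compute_min_prefixes_py := by
  intro names _hdom
  unfold Spec_compute_min_prefixes_py
  simp only [compute_min_prefixes_py, compute_min_prefixes_py_alt]
  apply congrArg PySem.Dict.items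
  apply PySem.List.foldl_congr_mem
  intro acc p hp
  rw [PySem.List.mem_enumerate_iff] at hp
  obtain ⟨k, hk, rfl⟩ := hp
  simp only [zero_add]
  set lowers := names.map PySem.Str.lower with hlowers
  have hL : lowers.length = names.length := by simp [hlowers]
  set order := PySem.List.sorted (PySem.List.pyRange 0 (names.length : Int) 1)
      (fun i => PySem.List.pyGetD lowers i "") false with horder
  congr 1
  -- A's value = B's value at index k
  have hkL : k < lowers.length := by omega
  -- A side
  have hA : PySem.List.pyGetD lowers (k : Int) "" = lowers.getD k "" := PySem.List.pyGetD_natCast _ _ _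
  rw [hA, pvAWhile_eq lowers k 1 (by omega) (by omega)]
  -- B side: locate k in order
  have hlen : order.length = names.length := by
    rw [horder, (PySem.List.sorted_perm _ _ _).length_eq, PySem.List.length_pyRange_one]
    omega
  have hmemO : ∀ x ∈ order, 0 ≤ x ∧ x < (names.length : Int) := by
    intro x hx
    rw [horder, PySem.List.mem_sorted] at hx
    exact PySem.List.mem_pyRange_one.mp hx
  have hndO : order.Nodup := by
    rw [horder]
    exact ((PySem.List.sorted_perm _ _ _).nodup_iff).mpr (PySem.List.nodup_pyRange_one _ _)
  have hkmem : (k : Int) ∈ order := by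
    rw [horder, PySem.List.mem_sorted, PySem.List.mem_pyRange_one]
    constructor <;> omega
  obtain ⟨t, ht, he⟩ := List.mem_iff_getElem.mp hkmem
  have hpmem : ((0 : Int) + (t : Int), order[t]) ∈ PySem.List.enumerate order 0 := by
    rw [PySem.List.mem_enumerate_iff]
    exact ⟨t, ht, rfl⟩
  have hget := foldl_pvBStep_getD lowers order (PySem.List.enumerate order 0)
      (List.replicate names.length (0 : Int))
      (by rw [PySem.List.map_snd_enumerate]; exact hndO)
      (by
        intro q hq
        rw [PySem.List.mem_enumerate_iff] at hq
        obtain ⟨r, hr, rfl⟩ := hq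
        have := hmemO _ (List.getElem_mem hr)
        simpa using this)
      _ hpmem
  simp only [he] at hget
  rw [hget]
  have hgd : order.getD t 0 = order[t] := List.getD_eq_getElem _ 0 ht
  have hlen2 : (PySem.List.sorted (PySem.List.pyRange 0 (lowers.length : Int) 1)
      (fun i => PySem.List.pyGetD lowers i "") false).length = lowers.length := by
    rw [(PySem.List.sorted_perm _ _ _).length_eq, PySem.List.length_pyRange_one]
    omega
  have hBV := pvBVal_sorted_eq_bigM lowers t (by rw [hlen2]; omega)
  rw [← hL] at horder
  rw [← horder, hgd, he] at hBV
  simp only [zero_add]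
  rw [hBV]
  simp only [Int.toNat_natCast]
  push_cast
  ring_nf
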